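-- pv_equiv track=rewrite | github.com/lmiksch/CoFPT | functions/convert_functions.py | split_ntseq_to_domainfp
-- ===== SOURCE A (Python) =====
-- def d_length(domain):
--     if domain[0] == "b" or domain[0] == "B":
--         return 5
--     elif domain == "l":
--         return 5
--     return 3
--
-- def split_ntseq_to_domainfp(nt_seq,domain_seq):
--     """Takes a nucleotide sequence and splits it up in subsequences where each sequence i corresponds to the sequence at transcription step i
--
--         Args:
--             nt_seq (string): nucleotide sequence
--             domain_seq (string: domain level sequence
--
--
--         Returns:
--             nt_path (list): list where each sublist corresponds to sequence at transcription step
--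
--     """
--
--     split_seq = domain_seq.split()
--
--     split_nt_sequence = []
--     UL_seq = UL_list(split_seq)
--
--     l_pointer = 0
--     for z in split_seq:
--         r_pointer = l_pointer + d_length(z)
--
--         split_nt_sequence.append(nt_seq[l_pointer:r_pointer])
--         l_pointer = r_pointer
--
--
--
--     nt_path = []
--
--     for  x in range(len(UL_seq)):
--         if UL_seq[x] == "l":
--
--             nt_path.append("".join(split_nt_sequence[:x+1]))
--     nt_path.append(nt_seq)
--
--     return nt_path
--
-- def UL_list(list):
--     """ Converts a list of domains into UL list
--     """
--     UL_liste = []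
--     for x in range(len(list)):
--         if list[x][-1] == "*":
--
--             UL_liste.append(list[x][:-1].upper())
--         else:
--             UL_liste.append(list[x])
--
--     return(UL_liste)
-- ===== SOURCE B (Python) =====
-- def split_ntseq_to_domainfp(nt_seq, domain_seq):
--     """Single pass: keep a running nt offset; emit the prefix at each 'l' domain."""
--     nt_path = []
--     offset = 0
--     for z in domain_seq.split():
--         offset += 5 if (z[0] in ("b", "B") or z == "l") else 3
--         if z == "l":
--             nt_path.append(nt_seq[:offset])
--     nt_path.append(nt_seq)
--     return nt_path
-- ===== Notes on version B (the rewrite author's own statement) =====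
-- stated objective: simpler
-- what changed: Single pass with a running integer offset: B drops A's intermediate slice list, the UL_list helper and the join-of-prefixes second loop, appending nt_seq[:offset] directly whenever the domain token is 'l' (starred tokens are upper-cased by UL_list, so only a literal 'l' ever matched).
import Mathlib
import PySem

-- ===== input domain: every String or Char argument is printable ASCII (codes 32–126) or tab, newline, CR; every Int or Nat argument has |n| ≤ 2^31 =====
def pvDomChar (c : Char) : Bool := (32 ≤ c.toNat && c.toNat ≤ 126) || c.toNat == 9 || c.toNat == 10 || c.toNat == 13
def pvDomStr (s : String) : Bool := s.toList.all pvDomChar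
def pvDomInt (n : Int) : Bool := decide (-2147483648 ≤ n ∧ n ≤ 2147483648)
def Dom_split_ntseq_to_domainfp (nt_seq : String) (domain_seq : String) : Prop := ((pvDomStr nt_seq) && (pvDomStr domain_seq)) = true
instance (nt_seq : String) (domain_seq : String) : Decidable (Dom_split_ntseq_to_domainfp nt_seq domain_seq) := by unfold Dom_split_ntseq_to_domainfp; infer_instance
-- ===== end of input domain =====

-- B folds once over the split domain sequence with a running nt-offset, appending nt_seq[:offset]
-- at each literal 'l' token — dropping A's slice list, UL_list helper and join-of-prefixes loop (objective: simpler).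

-- ===== PORT A =====
def d_length (domain : String) : Int :=
  if PySem.Str.pyGet? domain 0 = some 'b' ∨ PySem.Str.pyGet? domain 0 = some 'B' then 5
  else if domain = "l" then 5
  else 3

def UL_list (list : List String) : List String :=
  (PySem.List.pyRange 0 (PySem.List.len list) 1).foldl
    (fun acc x =>
      if PySem.Str.pyGet? (PySem.List.pyGetD list x "") (-1) = some '*' then
        acc ++ [PySem.Str.upper (PySem.Str.slice (PySem.List.pyGetD list x "") none (some (-1)))]
      else acc ++ [PySem.List.pyGetD list x ""]) []

def split_ntseq_to_domainfp (nt_seq : String) (domain_seq : String) : List String :=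
  let split_seq := PySem.Str.split₀ domain_seq
  let UL_seq := UL_list split_seq
  let st := split_seq.foldl
    (fun (st : List String × Int) z =>
      (st.1 ++ [PySem.Str.slice nt_seq (some st.2) (some (st.2 + d_length z))], st.2 + d_length z))
    ([], 0)
  let split_nt_sequence := st.1
  let nt_path := (PySem.List.pyRange 0 (PySem.List.len UL_seq) 1).foldl
    (fun acc x =>
      if PySem.List.pyGetD UL_seq x "" = "l" then
        acc ++ [PySem.Str.join "" (PySem.List.slice split_nt_sequence none (some (x + 1)))]
      else acc) []
  nt_path ++ [nt_seq]

-- ===== PORT B =====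
def split_ntseq_to_domainfp_alt (nt_seq : String) (domain_seq : String) : List String :=
  let st := (PySem.Str.split₀ domain_seq).foldl
    (fun (st : List String × Int) z =>
      let off := st.2 +
        (if PySem.Str.pyGet? z 0 = some 'b' ∨ PySem.Str.pyGet? z 0 = some 'B' ∨ z = "l" then (5 : Int) else 3)
      ((if z = "l" then st.1 ++ [PySem.Str.slice nt_seq none (some off)] else st.1), off))
    ([], 0)
  st.1 ++ [nt_seq]

-- ===== PRECONDITION & SPEC =====
def Spec_split_ntseq_to_domainfp (nt_seq : String) (domain_seq : String) (out : List String) : Prop := out = split_ntseq_to_domainfp_alt nt_seq domain_seq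
instance (nt_seq : String) (domain_seq : String) (out : List String) : Decidable (Spec_split_ntseq_to_domainfp nt_seq domain_seq out) := by unfold Spec_split_ntseq_to_domainfp; infer_instance

-- ===== CLAIM (what is proved, stated in full; the proofs are below) =====
def Claim_equal_split_ntseq_to_domainfp : Prop := ∀ (nt_seq : String) (domain_seq : String), Dom_split_ntseq_to_domainfp nt_seq domain_seq → Spec_split_ntseq_to_domainfp nt_seq domain_seq (split_ntseq_to_domainfp nt_seq domain_seq)

-- ===== LEMMAS AND PROOFS =====

/-- B's per-token length, as a Nat. -/
def pvDl (z : String) : Nat :=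
  if PySem.Str.pyGet? z 0 = some 'b' ∨ PySem.Str.pyGet? z 0 = some 'B' ∨ z = "l" then 5 else 3

def pvSum (ts : List String) : Nat := (ts.map pvDl).sum

/-- One step of A's UL_list. -/
def pvULone (t : String) : String :=
  if PySem.Str.pyGet? t (-1) = some '*' then PySem.Str.upper (PySem.Str.slice t none (some (-1))) else t

/-- The slice list A's first loop builds, starting at offset c. -/
def pvSlices (nt : String) : Nat → List String → List String
  | _, [] => []
  | c, z :: r => PySem.Str.slice nt (some (c : Int)) (some ((c : Int) + (pvDl z : Int))) :: pvSlices nt (c + pvDl z) r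

/-- The path both programs compute (before the final nt_seq), starting at offset c. -/
def pvPath (nt : String) : Nat → List String → List String
  | _, [] => []
  | c, z :: r =>
    (if z = "l" then [PySem.Str.slice nt none (some ((c + pvDl z : Nat) : Int))] else []) ++ pvPath nt (c + pvDl z) r

theorem pvDlen_eq (z : String) : d_length z = (pvDl z : Int) := by
  unfold d_length pvDl
  split_ifs with h1 h2 h3 h4 <;> first | rfl | (exfalso; tauto)

theorem pvFoldA (nt : String) : ∀ (ts : List String) (acc : List String) (c : Nat),
    ts.foldl (fun (st : List String × Int) z =>
        (st.1 ++ [PySem.Str.slice nt (some st.2) (some (st.2 + d_length z))], st.2 + d_length z))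
      (acc, (c : Int))
    = (acc ++ pvSlices nt c ts, ((c + pvSum ts : Nat) : Int)) := by
  intro ts
  induction ts with
  | nil => intro acc c; simp [pvSlices, pvSum]
  | cons z r ih =>
    intro acc c
    have hc : (c : Int) + d_length z = ((c + pvDl z : Nat) : Int) := by
      rw [pvDlen_eq]; push_cast; ring
    simp only [List.foldl_cons, hc]
    rw [ih _ (c + pvDl z)]
    simp only [Prod.mk.injEq]
    constructor
    · simp only [pvSlices]
      push_cast
      simp [List.append_assoc]
    · simp only [pvSum, List.map_cons, List.sum_cons]
      push_cast; ring

theorem pvFoldB (nt : String) : ∀ (ts : List String) (acc : List String) (c : Nat),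
    ts.foldl (fun (st : List String × Int) z =>
        let off := st.2 +
          (if PySem.Str.pyGet? z 0 = some 'b' ∨ PySem.Str.pyGet? z 0 = some 'B' ∨ z = "l" then (5 : Int) else 3)
        ((if z = "l" then st.1 ++ [PySem.Str.slice nt none (some off)] else st.1), off))
      (acc, (c : Int))
    = (acc ++ pvPath nt c ts, ((c + pvSum ts : Nat) : Int)) := by
  intro ts
  induction ts with
  | nil => intro acc c; simp [pvPath, pvSum]
  | cons z r ih =>
    intro acc c
    have hc : (c : Int) +
        (if PySem.Str.pyGet? z 0 = some 'b' ∨ PySem.Str.pyGet? z 0 = some 'B' ∨ z = "l" then (5 : Int) else 3)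
        = ((c + pvDl z : Nat) : Int) := by
      unfold pvDl; split_ifs <;> push_cast <;> ring
    simp only [List.foldl_cons, hc]
    rw [ih _ (c + pvDl z)]
    simp only [Prod.mk.injEq]
    constructor
    · simp only [pvPath]; split_ifs <;> simp [List.append_assoc]
    · simp only [pvSum, List.map_cons, List.sum_cons]
      push_cast; ring

theorem pvUpperChar_ne (c : Char) : PySem.Chars.upperChar c ≠ 'l' := by
  unfold PySem.Chars.upperChar
  split_ifs with h
  · intro heq
    have hl : 'a' ≤ c ∧ c ≤ 'z' := by simpa [PySem.Chars.islower] using h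
    have h97 : 97 ≤ c.toNat := by have := hl.1; rwa [Char.le_def] at this
    have h122 : c.toNat ≤ 122 := by have := hl.2; rwa [Char.le_def] at this
    have hv : (c.toNat - 32).isValidChar := Or.inl (by omega)
    have h2 := congrArg Char.toNat heq
    rw [Char.toNat_ofNat, if_pos hv] at h2
    have h3 : ('l').toNat = 108 := rfl
    rw [h3] at h2
    omega
  · intro heq
    rw [heq] at h
    simp [PySem.Chars.islower] at h

theorem pvULone_eq_l_iff (z : String) : pvULone z = "l" ↔ z = "l" := by
  constructor
  · intro h
    unfold pvULone at h
    split_ifs at h with hstar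
    · exfalso
      have := congrArg String.toList h
      rw [PySem.Str.toList_upper] at this
      have hl : ("l" : String).toList = ['l'] := rfl
      rw [hl] at this
      unfold PySem.Chars.upper at this
      rcases List.map_eq_singleton_iff.mp this with ⟨a, _, ha⟩
      exact pvUpperChar_ne a ha
    · exact h
  · intro h; subst h
    unfold pvULone
    rw [if_neg]
    simp [PySem.List.pyGet?, PySem.List.pyIdx?]

theorem pvUL_eq_map (l : List String) : UL_list l = l.map pvULone := by
  unfold UL_list
  have h1 := PySem.List.foldl_pyRange_zero_pyGetD l ""
    (fun acc t => if PySem.Str.pyGet? t (-1) = some '*' then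
        acc ++ [PySem.Str.upper (PySem.Str.slice t none (some (-1)))] else acc ++ [t]) []
  have h2 := PySem.List.foldl_congr_mem l
    (fun acc t => if PySem.Str.pyGet? t (-1) = some '*' then
        acc ++ [PySem.Str.upper (PySem.Str.slice t none (some (-1)))] else acc ++ [t])
    (fun acc t => acc ++ [pvULone t]) []
    (by intro acc x _; unfold pvULone; dsimp only; split_ifs <;> rfl)
  have h3 := PySem.List.foldl_append_eq_flatMap (fun t => [pvULone t]) l []
  exact h1.trans (h2.trans (h3.trans (by rw [← List.map_eq_flatMap]; simp)))

theorem pvJoinNilCons (p : List Char) (l : List (List Char)) :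
    PySem.Chars.join [] (p :: l) = p ++ PySem.Chars.join [] l := by
  cases l with
  | nil => simp [PySem.Chars.join_singleton, PySem.Chars.join_nil]
  | cons q r => rw [PySem.Chars.join_cons_cons]; simp

theorem pvJoinSlices (nt : String) : ∀ (ts : List String) (c : Nat),
    (PySem.Str.join "" (pvSlices nt c ts)).toList = (nt.toList.drop c).take (pvSum ts) := by
  intro ts
  induction ts with
  | nil => intro c; simp [pvSlices, pvSum, PySem.Str.toList_join, PySem.Chars.join_nil]
  | cons z r ih =>
    intro c
    have hz : (PySem.Str.slice nt (some (c : Int)) (some ((c : Int) + (pvDl z : Int)))).toList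
        = (nt.toList.drop c).take (pvDl z) := by
      rw [PySem.Str.toList_slice, PySem.Chars.slice_eq_listSlice, PySem.List.slice_natCast_add]
    have hjoin : (PySem.Str.join "" (pvSlices nt c (z :: r))).toList
        = (PySem.Str.slice nt (some (c : Int)) (some ((c : Int) + (pvDl z : Int)))).toList
          ++ (PySem.Str.join "" (pvSlices nt (c + pvDl z) r)).toList := by
      rw [PySem.Str.toList_join, PySem.Str.toList_join]
      have hsep : ("" : String).toList = ([] : List Char) := rfl
      simp only [pvSlices, List.map_cons, hsep]
      rw [pvJoinNilCons]
    rw [hjoin, hz, ih (c + pvDl z)]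
    have : pvSum (z :: r) = pvDl z + pvSum r := by simp [pvSum]
    rw [this, List.take_add, List.drop_drop]

theorem pvLenSlices (nt : String) : ∀ (ts : List String) (c : Nat), (pvSlices nt c ts).length = ts.length := by
  intro ts
  induction ts with
  | nil => intro c; simp [pvSlices]
  | cons z r ih => intro c; simp [pvSlices, ih]

theorem pvSlicesAppend (nt : String) : ∀ (ts : List String) (z : String) (c : Nat),
    pvSlices nt c (ts ++ [z])
    = pvSlices nt c ts
      ++ [PySem.Str.slice nt (some ((c + pvSum ts : Nat) : Int))
            (some (((c + pvSum ts : Nat) : Int) + (pvDl z : Int)))] := by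
  intro ts
  induction ts with
  | nil => intro z c; simp [pvSlices, pvSum]
  | cons w r ih =>
    intro z c
    simp only [List.cons_append, pvSlices, ih z (c + pvDl w), List.cons_append]
    have : c + pvDl w + pvSum r = c + pvSum (w :: r) := by simp [pvSum]; omega
    rw [this]

theorem pvPathAppend (nt : String) : ∀ (ts : List String) (z : String) (c : Nat),
    pvPath nt c (ts ++ [z])
    = pvPath nt c ts
      ++ (if z = "l" then [PySem.Str.slice nt none (some ((c + pvSum ts + pvDl z : Nat) : Int))] else []) := by
  intro ts
  induction ts with
  | nil => intro z c; simp [pvPath, pvSum]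
  | cons w r ih =>
    intro z c
    simp only [List.cons_append, pvPath, ih z (c + pvDl w), List.append_assoc]
    have : c + pvDl w + pvSum r = c + pvSum (w :: r) := by simp [pvSum]; omega
    rw [this]

theorem pvGetDAppendLeft {α : Type} (l1 l2 : List α) (d : α) (k : Nat) (hk : k < l1.length) :
    PySem.List.pyGetD (l1 ++ l2) (k : Int) d = PySem.List.pyGetD l1 (k : Int) d := by
  rw [PySem.List.pyGetD_of_nonneg _ _ (by positivity), PySem.List.pyGetD_of_nonneg _ _ (by positivity)]
  simp only [Int.toNat_natCast, List.getD]
  rw [List.getElem?_append_left hk]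

theorem pvGetDAppendRight {α : Type} (l1 : List α) (u d : α) :
    PySem.List.pyGetD (l1 ++ [u]) ((l1.length : Nat) : Int) d = u := by
  rw [PySem.List.pyGetD_of_nonneg _ _ (by positivity)]
  simp [List.getD]

/-- A's second loop (over UL indices, joining slice prefixes) computes pvPath. -/
theorem pvMain (nt : String) : ∀ (ts : List String),
    (PySem.List.pyRange 0 (PySem.List.len (ts.map pvULone)) 1).foldl
      (fun acc x =>
        if PySem.List.pyGetD (ts.map pvULone) x "" = "l" then
          acc ++ [PySem.Str.join "" (PySem.List.slice (pvSlices nt 0 ts) none (some (x + 1)))]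
        else acc) []
    = pvPath nt 0 ts := by
  intro ts
  induction ts using List.reverseRecOn with
  | nil => simp [PySem.List.len_eq, pvPath, PySem.List.pyRange_one_eq_nil]
  | append_singleton ds z ih =>
    have hlen : PySem.List.len ((ds ++ [z]).map pvULone) = ((ds.length : Int) + 1) := by
      simp [PySem.List.len_eq]
    rw [hlen, PySem.List.pyRange_one_succ_right (by positivity), List.foldl_append]
    have hbody : (PySem.List.pyRange 0 (ds.length : Int) 1).foldl
        (fun acc x =>
          if PySem.List.pyGetD ((ds ++ [z]).map pvULone) x "" = "l" then
            acc ++ [PySem.Str.join "" (PySem.List.slice (pvSlices nt 0 (ds ++ [z])) none (some (x + 1)))]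
          else acc) []
        = (PySem.List.pyRange 0 (ds.length : Int) 1).foldl
        (fun acc x =>
          if PySem.List.pyGetD (ds.map pvULone) x "" = "l" then
            acc ++ [PySem.Str.join "" (PySem.List.slice (pvSlices nt 0 ds) none (some (x + 1)))]
          else acc) [] := by
      apply PySem.List.foldl_congr_mem
      intro acc x hx
      rcases PySem.List.mem_pyRange_one.mp hx with ⟨hx0, hx1⟩
      obtain ⟨k, rfl⟩ : ∃ k : Nat, x = (k : Int) := ⟨x.toNat, by omega⟩
      have hk : k < ds.length := by exact_mod_cast hx1
      have hget : PySem.List.pyGetD ((ds ++ [z]).map pvULone) (k : Int) ""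
          = PySem.List.pyGetD (ds.map pvULone) (k : Int) "" := by
        rw [List.map_append]
        exact pvGetDAppendLeft _ _ _ k (by simpa using hk)
      have hslice : PySem.List.slice (pvSlices nt 0 (ds ++ [z])) none (some ((k : Int) + 1))
          = PySem.List.slice (pvSlices nt 0 ds) none (some ((k : Int) + 1)) := by
        have h1 : ((k : Int) + 1) = ((k + 1 : Nat) : Int) := by push_cast; ring
        rw [h1, PySem.List.slice_to_natCast, PySem.List.slice_to_natCast,
          pvSlicesAppend nt ds z 0, List.take_append_of_le_length]
        rw [pvLenSlices]; omega
      rw [hget, hslice]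
    rw [PySem.List.len_eq, List.length_map] at ih
    rw [hbody, ih]
    simp only [List.foldl_cons, List.foldl_nil]
    have hgetu : PySem.List.pyGetD ((ds ++ [z]).map pvULone) ((ds.length : Nat) : Int) "" = pvULone z := by
      rw [List.map_append, List.map_singleton]
      have h := pvGetDAppendRight (ds.map pvULone) (pvULone z) ""
      rwa [List.length_map] at h
    simp only [hgetu]
    rw [pvPathAppend nt ds z 0]
    by_cases hz : z = "l"
    · have hu : pvULone z = "l" := (pvULone_eq_l_iff z).mpr hz
      rw [if_pos hu, if_pos hz]
      congr 1
      have hfull : PySem.List.slice (pvSlices nt 0 (ds ++ [z])) none (some ((ds.length : Int) + 1))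
          = pvSlices nt 0 (ds ++ [z]) := by
        have h1 : ((ds.length : Int) + 1) = ((ds.length + 1 : Nat) : Int) := by push_cast; ring
        rw [h1, PySem.List.slice_to_natCast, List.take_of_length_le]
        rw [pvLenSlices]; simp
      rw [hfull]
      congr 1
      apply String.toList_inj.mp
      rw [pvJoinSlices nt (ds ++ [z]) 0, PySem.Str.toList_slice, PySem.Chars.slice_eq_listSlice,
        PySem.List.slice_to_natCast]
      have : pvSum (ds ++ [z]) = 0 + pvSum ds + pvDl z := by simp [pvSum]
      rw [this]
      simp
    · have hu : pvULone z ≠ "l" := fun h => hz ((pvULone_eq_l_iff z).mp h)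
      rw [if_neg hu, if_neg hz]
      simp

-- ===== VERDICT (by name: the statement is the Claim_ definition above) =====
theorem split_ntseq_to_domainfp_spec : Claim_equal_split_ntseq_to_domainfp := by
  intro nt ds _
  unfold Spec_split_ntseq_to_domainfp split_ntseq_to_domainfp split_ntseq_to_domainfp_alt
  simp only []
  rw [pvUL_eq_map]
  have hA := pvFoldA nt (PySem.Str.split₀ ds) [] 0
  have hB := pvFoldB nt (PySem.Str.split₀ ds) [] 0
  simp only [Nat.cast_zero, List.nil_append, Nat.zero_add] at hA hB
  rw [hA, hB]
  exact congrArg (fun ll => ll ++ [nt]) (pvMain nt (PySem.Str.split₀ ds))
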